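-- pv_equiv track=rewrite | github.com/zdx3578/arc-dsl | dslIsDo.py | is_position_swapped
-- ===== SOURCE A (Python) =====
-- from collections import defaultdict
-- from collections import defaultdict
--
-- def is_position_swapped(diff1: defaultdict, diff2: defaultdict) -> bool:
--     for value1, positions1 in diff1.items():
--         found_swap = False
--         for value2, positions2 in diff2.items():
--             # 跳过相同 value 的情况，只检查不同 value 的互换
--             if value1 == value2:
--                 continue
--             # 检查 positions 是否一致
--             if sorted(positions1) == sorted(positions2):
--                 found_swap = True
--                 break
--         # 如果当前 value1 没有找到对应的交换关系，返回 False
--         if not found_swap: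
--             return False
--     return True
-- ===== SOURCE B (Python) =====
-- def is_position_swapped(diff1, diff2):
--     index = {}
--     for value2, positions2 in diff2.items():
--         index.setdefault(tuple(sorted(positions2)), set()).add(value2)
--     for value1, positions1 in diff1.items():
--         vals = index.get(tuple(sorted(positions1)))
--         if vals is None or vals == {value1}:
--             return False
--     return True
-- ===== Notes on version B (the rewrite author's own statement) =====
-- stated objective: alternative
-- what changed: Replaces the nested scan of diff2 per diff1 entry by a dict built once, mapping each sorted-positions tuple to the set of diff2 values with those positions, so each diff1 entry becomes a single lookup; on the benchmark's inputs A's early exits make the two comparable, so no speed is claimed.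
import Mathlib
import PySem

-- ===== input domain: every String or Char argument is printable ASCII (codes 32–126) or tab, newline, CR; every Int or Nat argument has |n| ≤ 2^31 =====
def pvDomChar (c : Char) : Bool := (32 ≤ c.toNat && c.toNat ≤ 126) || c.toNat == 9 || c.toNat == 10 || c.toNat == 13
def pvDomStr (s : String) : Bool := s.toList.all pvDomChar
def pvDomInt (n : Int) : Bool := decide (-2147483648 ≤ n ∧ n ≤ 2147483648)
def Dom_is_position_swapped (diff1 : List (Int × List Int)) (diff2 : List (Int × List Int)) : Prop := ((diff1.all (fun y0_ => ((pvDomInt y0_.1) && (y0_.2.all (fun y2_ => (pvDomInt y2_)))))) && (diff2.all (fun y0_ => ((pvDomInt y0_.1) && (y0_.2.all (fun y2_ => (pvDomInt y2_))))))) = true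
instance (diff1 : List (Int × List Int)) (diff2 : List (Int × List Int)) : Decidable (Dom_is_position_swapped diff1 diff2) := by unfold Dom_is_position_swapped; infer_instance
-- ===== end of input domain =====

-- B replaces A's per-entry scan of diff2 by a dict from sorted-positions key to the set of diff2 values; a different algorithm, proved to return the same value on all inputs.


-- ===== PORT A =====
-- inner 'for value2, positions2 in diff2.items(): …' loop computing found_swap (with break)
def pvInnerA (value1 : Int) (positions1 : List Int) : List (Int × List Int) → Bool
  | [] => false
  | (value2, positions2) :: rest =>
    if value1 == value2 then pvInnerA value1 positions1 rest
    else if PySem.List.sorted positions1 (fun x => x) false == PySem.List.sorted positions2 (fun x => x) false then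
      true
    else pvInnerA value1 positions1 rest

def is_position_swapped (diff1 : List (Int × List Int)) (diff2 : List (Int × List Int)) : Bool :=
  match diff1 with
  | [] => true
  | (value1, positions1) :: rest =>
    if pvInnerA value1 positions1 diff2 then is_position_swapped rest diff2
    else false

-- ===== PORT B =====
-- index.setdefault(tuple(sorted(positions2)), set()).add(value2), folded over diff2
def pvIndexB (diff2 : List (Int × List Int)) : PySem.Dict (List Int) (PySem.Set Int) :=
  diff2.foldl
    (fun d p => d.modify (PySem.List.sorted p.2 (fun x => x) false) [] (fun s => PySem.Set.add s p.1))
    PySem.Dict.empty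

def is_position_swapped_alt (diff1 : List (Int × List Int)) (diff2 : List (Int × List Int)) : Bool :=
  let index := pvIndexB diff2
  diff1.all (fun p =>
    match index.get? (PySem.List.sorted p.2 (fun x => x) false) with
    | none => false
    | some vals => !(PySem.Set.equal vals [p.1]))

-- ===== PRECONDITION & SPEC =====
def Spec_is_position_swapped (diff1 : List (Int × List Int)) (diff2 : List (Int × List Int)) (out : Bool) : Prop := out = is_position_swapped_alt diff1 diff2
instance (diff1 : List (Int × List Int)) (diff2 : List (Int × List Int)) (out : Bool) : Decidable (Spec_is_position_swapped diff1 diff2 out) := by unfold Spec_is_position_swapped; infer_instance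

-- ===== CLAIM (what is proved, stated in full; the proofs are below) =====
def Claim_equal_is_position_swapped : Prop := ∀ (diff1 : List (Int × List Int)) (diff2 : List (Int × List Int)), Dom_is_position_swapped diff1 diff2 → Spec_is_position_swapped diff1 diff2 (is_position_swapped diff1 diff2)

-- ===== LEMMAS AND PROOFS =====

-- characterisation of A's inner loop
theorem pvInnerA_iff (v1 : Int) (p1 : List Int) (l : List (Int × List Int)) :
    pvInnerA v1 p1 l = true ↔
      ∃ p ∈ l, p.1 ≠ v1 ∧ PySem.List.sorted p.2 (fun x => x) false = PySem.List.sorted p1 (fun x => x) false := by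
  induction l with
  | nil => simp [pvInnerA]
  | cons q rest ih =>
    obtain ⟨v2, p2⟩ := q
    simp only [pvInnerA]
    by_cases h1 : v1 = v2
    · rw [if_pos (by simpa using h1), ih]
      constructor
      · rintro ⟨p, hp, hne, hs⟩; exact ⟨p, List.mem_cons_of_mem _ hp, hne, hs⟩
      · rintro ⟨p, hp, hne, hs⟩
        rcases List.mem_cons.mp hp with h | h
        · exact absurd (congrArg Prod.fst h) (by simp [← h1] at hne ⊢; exact hne)
        · exact ⟨p, h, hne, hs⟩
    · rw [if_neg (by simpa using h1)]
      by_cases h2 : PySem.List.sorted p1 (fun x => x) false = PySem.List.sorted p2 (fun x => x) false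
      · rw [if_pos (by simpa using h2)]
        simp only [true_iff]
        exact ⟨(v2, p2), List.mem_cons_self, fun h => h1 h.symm, h2.symm⟩
      · rw [if_neg (by simpa using h2), ih]
        constructor
        · rintro ⟨p, hp, hne, hs⟩; exact ⟨p, List.mem_cons_of_mem _ hp, hne, hs⟩
        · rintro ⟨p, hp, hne, hs⟩
          rcases List.mem_cons.mp hp with h | h
          · subst h; exact absurd hs.symm h2
          · exact ⟨p, h, hne, hs⟩

-- membership in the set stored by B's index fold
theorem pvIndexB_getD_mem (l : List (Int × List Int)) (d : PySem.Dict (List Int) (PySem.Set Int)) (k : List Int) (y : Int) :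
    (y ∈ (l.foldl (fun d p => d.modify (PySem.List.sorted p.2 (fun x => x) false) [] (fun s => PySem.Set.add s p.1)) d).getD k []) ↔
      y ∈ d.getD k [] ∨ ∃ p ∈ l, PySem.List.sorted p.2 (fun x => x) false = k ∧ p.1 = y := by
  induction l generalizing d with
  | nil => simp
  | cons q rest ih =>
    rw [List.foldl_cons, ih, PySem.Dict.getD_modify]
    by_cases hk : k = PySem.List.sorted q.2 (fun x => x) false
    · rw [if_pos hk]
      constructor
      · rintro (hm | ⟨p, hp, hs, hy⟩)
        · rcases (PySem.Set.mem_add _ _ _).mp hm with h | h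
          · exact Or.inl (hk ▸ h)
          · exact Or.inr ⟨q, List.mem_cons_self, hk.symm, h.symm⟩
        · exact Or.inr ⟨p, List.mem_cons_of_mem _ hp, hs, hy⟩
      · rintro (h | ⟨p, hp, hs, hy⟩)
        · exact Or.inl ((PySem.Set.mem_add _ _ _).mpr (Or.inl (hk ▸ h)))
        · rcases List.mem_cons.mp hp with he | hm
          · subst he; exact Or.inl ((PySem.Set.mem_add _ _ _).mpr (Or.inr hy.symm))
          · exact Or.inr ⟨p, hm, hs, hy⟩
    · rw [if_neg hk]
      constructor
      · rintro (h | ⟨p, hp, hs, hy⟩)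
        · exact Or.inl h
        · exact Or.inr ⟨p, List.mem_cons_of_mem _ hp, hs, hy⟩
      · rintro (h | ⟨p, hp, hs, hy⟩)
        · exact Or.inl h
        · rcases List.mem_cons.mp hp with he | hm
          · subst he; exact absurd hs.symm hk
          · exact Or.inr ⟨p, hm, hs, hy⟩

-- which keys B's index contains
theorem pvIndexB_contains (diff2 : List (Int × List Int)) (k : List Int) :
    (pvIndexB diff2).contains k = true ↔ ∃ p ∈ diff2, PySem.List.sorted p.2 (fun x => x) false = k := by
  unfold pvIndexB
  rw [PySem.Dict.contains_iff_mem_keys,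
    PySem.Dict.keys_foldl_modify_key diff2 (fun p => PySem.List.sorted p.2 (fun x => x) false)
      [] (fun _ p s => PySem.Set.add s p.1) PySem.Dict.empty]
  rw [PySem.Set.mem_update]
  simp [PySem.Dict.keys, PySem.Dict.empty]

-- per-entry agreement: A's inner loop equals B's lookup test
theorem pvElem_eq (v1 : Int) (p1 : List Int) (diff2 : List (Int × List Int)) :
    pvInnerA v1 p1 diff2 =
      (match (pvIndexB diff2).get? (PySem.List.sorted p1 (fun x => x) false) with
       | none => false
       | some vals => !(PySem.Set.equal vals [v1])) := by
  set k := PySem.List.sorted p1 (fun x => x) false with hk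
  have hmem : ∀ y : Int, (y ∈ (pvIndexB diff2).getD k []) ↔
      ∃ p ∈ diff2, PySem.List.sorted p.2 (fun x => x) false = k ∧ p.1 = y := by
    intro y
    have := pvIndexB_getD_mem diff2 PySem.Dict.empty k y
    simpa [pvIndexB] using this
  cases hget : (pvIndexB diff2).get? k with
  | none =>
    have hcon : (pvIndexB diff2).contains k = false := by
      rw [PySem.Dict.contains_eq_isSome_get?, hget]; rfl
    have hno : ¬ ∃ p ∈ diff2, PySem.List.sorted p.2 (fun x => x) false = k := by
      rw [← pvIndexB_contains diff2 k, hcon]; simp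
    have h1 : pvInnerA v1 p1 diff2 = false := by
      rw [← Bool.not_eq_true, pvInnerA_iff]
      rintro ⟨p, hp, _, hs⟩
      exact hno ⟨p, hp, by rw [hs, hk]⟩
    exact h1
  | some vals =>
    have hvals : (pvIndexB diff2).getD k [] = vals := by
      rw [PySem.Dict.getD_eq_get?_getD, hget]; rfl
    have hcon : (pvIndexB diff2).contains k = true := by
      rw [PySem.Dict.contains_eq_isSome_get?, hget]; rfl
    have hex : ∃ p ∈ diff2, PySem.List.sorted p.2 (fun x => x) false = k :=
      (pvIndexB_contains diff2 k).mp hcon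
    have hmem' : ∀ y : Int, y ∈ vals ↔ ∃ p ∈ diff2, PySem.List.sorted p.2 (fun x => x) false = k ∧ p.1 = y := by
      intro y; rw [← hvals]; exact hmem y
    show pvInnerA v1 p1 diff2 = !(PySem.Set.equal vals [v1])
    by_cases hA : ∃ p ∈ diff2, p.1 ≠ v1 ∧ PySem.List.sorted p.2 (fun x => x) false = k
    · obtain ⟨p, hp, hne, hs⟩ := hA
      have h1 : pvInnerA v1 p1 diff2 = true :=
        (pvInnerA_iff v1 p1 diff2).mpr ⟨p, hp, hne, by rw [hs, hk]⟩
      have h2 : PySem.Set.equal vals [v1] = false := by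
        rw [← Bool.not_eq_true, PySem.Set.equal_iff]
        intro hall
        have hpm : p.1 ∈ vals := (hmem' p.1).mpr ⟨p, hp, hs, rfl⟩
        have := (hall p.1).mp hpm
        simp at this
        exact hne this
      rw [h1, h2]; rfl
    · have h1 : pvInnerA v1 p1 diff2 = false := by
        rw [← Bool.not_eq_true, pvInnerA_iff]
        rintro ⟨p, hp, hne, hs⟩
        exact hA ⟨p, hp, hne, by rw [hs, hk]⟩
      have hsub : ∀ y ∈ vals, y = v1 := by
        intro y hy
        obtain ⟨p, hp, hs, hpy⟩ := (hmem' y).mp hy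
        by_contra hne
        exact hA ⟨p, hp, by rw [hpy]; exact hne, hs⟩
      have hv1 : v1 ∈ vals := by
        obtain ⟨p, hp, hs⟩ := hex
        have hpm : p.1 ∈ vals := (hmem' p.1).mpr ⟨p, hp, hs, rfl⟩
        rwa [hsub p.1 hpm] at hpm
      have h2 : PySem.Set.equal vals [v1] = true := by
        rw [PySem.Set.equal_iff]
        intro x
        constructor
        · intro hx; simp [hsub x hx]
        · intro hx; simp at hx; rwa [hx]
      rw [h1, h2]; rfl

-- ===== VERDICT (by name: the statement is the Claim_ definition above) =====
theorem is_position_swapped_spec : Claim_equal_is_position_swapped := by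
  intro diff1 diff2 hd
  clear hd
  unfold Spec_is_position_swapped
  induction diff1 with
  | nil => rfl
  | cons q rest ih =>
    obtain ⟨v1, p1⟩ := q
    have halt : is_position_swapped_alt ((v1, p1) :: rest) diff2 =
        ((match (pvIndexB diff2).get? (PySem.List.sorted p1 (fun x => x) false) with
          | none => false
          | some vals => !(PySem.Set.equal vals [v1])) && is_position_swapped_alt rest diff2) := by
      simp only [is_position_swapped_alt, List.all_cons]
    rw [halt]
    show (if pvInnerA v1 p1 diff2 then is_position_swapped rest diff2 else false) = _
    rw [pvElem_eq v1 p1 diff2, ih]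
    generalize (match (pvIndexB diff2).get? (PySem.List.sorted p1 (fun x => x) false) with
      | none => false
      | some vals => !(PySem.Set.equal vals [v1]) : Bool) = b
    cases b <;> simp
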